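-- pv_equiv track=rewrite | github.com/MrBrantCode/unitest_baseline | mut_generate/mist_train_cf/cf_66334/solution.py | solve
-- ===== SOURCE A (Python) =====
-- def is_prime(n):
--     if n <= 1:
--         return False
--     if n == 2:
--         return True
--     if n % 2 == 0:
--         return False
--
--     i = 3
--     while i * i <= n:
--         if n % i == 0:
--             return False
--         i += 2
--
--     return True
--
-- def solve(n):
--     sum_primes = 0
--     smallest_odd_prime = None
--     for i in range(2, n+1):
--         if is_prime(i):
--             sum_primes += i**5
--             if smallest_odd_prime is None and i % 2 != 0:
--                 smallest_odd_prime = i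
--
--     if sum_primes % 2 != 0:
--         return (sum_primes, smallest_odd_prime)
--     else:
--         return (sum_primes,)
-- ===== SOURCE B (Python) =====
-- def solve(n):
--     # Sieve of Eratosthenes (mark-all variant) instead of per-number trial division.
--     comp = set()
--     p = 2
--     while p * p <= n:
--         for m in range(p * p, n + 1, p):
--             comp.add(m)
--         p += 1
--     primes = [i for i in range(2, n + 1) if i not in comp]
--     total = sum(i ** 5 for i in primes)
--     if total % 2 != 0:
--         first_odd = next((i for i in primes if i % 2 != 0), None)
--         return (total, first_odd)
--     return (total,)
-- ===== Notes on version B (the rewrite author's own statement) =====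
-- stated objective: faster
-- what changed: A trial-divides every i in 2..n individually (O(sqrt i) per number); B builds the set of composites once with a Sieve of Eratosthenes (marking all multiples of every p with p*p <= n) and then filters, sums the fifth powers and takes the first odd prime from that list.
import Mathlib
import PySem

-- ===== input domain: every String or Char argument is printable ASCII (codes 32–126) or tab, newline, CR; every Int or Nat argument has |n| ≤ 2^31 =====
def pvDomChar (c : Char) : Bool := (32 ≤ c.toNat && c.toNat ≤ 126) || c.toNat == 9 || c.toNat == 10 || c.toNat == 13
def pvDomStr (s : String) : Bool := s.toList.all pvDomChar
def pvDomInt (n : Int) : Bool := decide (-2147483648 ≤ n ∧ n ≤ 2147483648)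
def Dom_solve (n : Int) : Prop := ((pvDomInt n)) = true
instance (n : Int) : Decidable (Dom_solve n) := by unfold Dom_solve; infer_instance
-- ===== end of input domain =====

-- B replaces A's per-number trial division by a Sieve-of-Eratosthenes composite set built once; return value only.

-- ===== PORT A =====
-- while i * i <= n: if n % i == 0: return False; i += 2
def isPrimeLoop (n : Int) : Nat → Int → Bool
  | 0, _ => true  -- fuel guard only: never reached with the fuel is_prime supplies
  | fuel + 1, i =>
    if i * i ≤ n then
      if PySem.Int.mod n i = 0 then false
      else isPrimeLoop n fuel (i + 2)
    else true

def is_prime (n : Int) : Bool :=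
  if n ≤ 1 then false
  else if n = 2 then true
  else if PySem.Int.mod n 2 = 0 then false
  else isPrimeLoop n (n.toNat + 1) 3

-- loop body of A's for-loop: state = (sum_primes, smallest_odd_prime)
def solveStep (st : Int × Option Int) (i : Int) : Int × Option Int :=
  if is_prime i then
    (st.1 + i ^ 5,
      match st.2 with
      | none => if PySem.Int.mod i 2 ≠ 0 then some i else none
      | some v => some v)
  else st

def solve (n : Int) : List Int :=
  let r := (PySem.List.pyRange 2 (n + 1) 1).foldl solveStep (0, none)
  if PySem.Int.mod r.1 2 ≠ 0 then
    match r.2 with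
    | some v => [r.1, v]
    | none => [r.1]  -- unreachable: an odd sum requires an odd prime term
  else [r.1]

-- ===== PORT B =====
-- for m in range(p*p, n+1, p): comp.add(m)
def markMultiples (n p : Int) (s : PySem.Set Int) : PySem.Set Int :=
  (PySem.List.pyRange (p * p) (n + 1) p).foldl (fun s m => s.add m) s

-- while p * p <= n: mark multiples of p; p += 1
def sieveLoop (n : Int) : Nat → Int → PySem.Set Int → PySem.Set Int
  | 0, _, s => s  -- fuel guard only: never reached with the fuel solve_alt supplies
  | fuel + 1, p, s => if p * p ≤ n then sieveLoop n fuel (p + 1) (markMultiples n p s) else s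

def solve_alt (n : Int) : List Int :=
  let comp := sieveLoop n (n.toNat + 1) 2 PySem.Set.empty
  let primes := (PySem.List.pyRange 2 (n + 1) 1).filter (fun i => !(comp.contains i))
  let total := (primes.map (fun i => i ^ 5)).sum
  if PySem.Int.mod total 2 ≠ 0 then
    match primes.find? (fun i => PySem.Int.mod i 2 ≠ 0) with
    | some v => [total, v]
    | none => [total]  -- unreachable: an odd sum requires an odd prime term
  else [total]

-- ===== PRECONDITION & SPEC =====
def Spec_solve (n : Int) (out : List Int) : Prop := out = solve_alt n
instance (n : Int) (out : List Int) : Decidable (Spec_solve n out) := by unfold Spec_solve; infer_instance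

-- ===== CLAIM (what is proved, stated in full; the proofs are below) =====
def Claim_equal_solve : Prop := ∀ (n : Int), Dom_solve n → Spec_solve n (solve n)

-- ===== LEMMAS AND PROOFS =====

-- x is in the set after adding every element of l
lemma mem_foldl_add (l : List Int) (s : PySem.Set Int) (x : Int) :
    x ∈ l.foldl (fun s m => PySem.Set.add s m) s ↔ x ∈ s ∨ x ∈ l := by
  induction l generalizing s with
  | nil => simp
  | cons a l ih => simp [List.foldl_cons, ih, PySem.Set.mem_add]; tauto

lemma mem_markMultiples (n p x : Int) (s : PySem.Set Int) :
    x ∈ markMultiples n p s ↔ x ∈ s ∨ x ∈ PySem.List.pyRange (p * p) (n + 1) p := by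
  unfold markMultiples; exact mem_foldl_add _ _ _

lemma mem_sieveLoop (n : Int) (x : Int) : ∀ (k : Nat) (p : Int) (s : PySem.Set Int),
    (n + 1 - p).toNat ≤ k → 2 ≤ p →
    (x ∈ sieveLoop n k p s ↔ x ∈ s ∨ ∃ q, p ≤ q ∧ q * q ≤ n ∧ x ∈ PySem.List.pyRange (q * q) (n + 1) q) := by
  intro k
  induction k with
  | zero =>
    intro p s hk hp
    have hpp : p ≤ p * p := by nlinarith
    have hpn : ¬ p * p ≤ n := by omega
    rw [sieveLoop]
    constructor
    · exact Or.inl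
    · rintro (h | ⟨q, hq1, hq2, _⟩)
      · exact h
      · exfalso; nlinarith
  | succ k ih =>
    intro p s hk hp
    rw [sieveLoop]
    by_cases hpn : p * p ≤ n
    · rw [if_pos hpn]
      have hple : p ≤ n := by nlinarith
      rw [ih (p + 1) _ (by omega) (by omega), mem_markMultiples]
      constructor
      · rintro ((h | h) | ⟨q, hq1, hq2, hq3⟩)
        · exact Or.inl h
        · exact Or.inr ⟨p, le_refl p, hpn, h⟩
        · exact Or.inr ⟨q, by omega, hq2, hq3⟩
      · rintro (h | ⟨q, hq1, hq2, hq3⟩)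
        · exact Or.inl (Or.inl h)
        · rcases eq_or_lt_of_le hq1 with rfl | hlt
          · exact Or.inl (Or.inr hq3)
          · exact Or.inr ⟨q, by omega, hq2, hq3⟩
    · rw [if_neg hpn]
      constructor
      · exact Or.inl
      · rintro (h | ⟨q, hq1, hq2, _⟩)
        · exact h
        · exfalso; nlinarith

lemma int_dvd_iff_toNat {d n : Int} (hd : 0 ≤ d) (hn : 0 ≤ n) : d ∣ n ↔ d.toNat ∣ n.toNat := by
  rw [← Int.natCast_dvd_natCast, Int.toNat_of_nonneg hd, Int.toNat_of_nonneg hn]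

-- a proper divisor 2 ≤ d < i refutes primality of i
lemma not_prime_of_divisor {i d : Int} (h2 : 2 ≤ d) (hlt : d < i) (hdvd : d ∣ i) :
    ¬ Nat.Prime i.toNat := by
  intro hp
  have hi : (0:Int) ≤ i := by omega
  rw [int_dvd_iff_toNat (by omega) hi] at hdvd
  rcases (Nat.Prime.eq_one_or_self_of_dvd hp _ hdvd) with h | h <;> omega

lemma mem_sieve_iff_not_prime (n i : Int) (h2 : 2 ≤ i) (hn : i ≤ n) :
    (i ∈ sieveLoop n (n.toNat + 1) 2 PySem.Set.empty) ↔ ¬ Nat.Prime i.toNat := by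
  rw [mem_sieveLoop n i (n.toNat + 1) 2 _ (by omega) (le_refl _)]
  have hempty : i ∉ (PySem.Set.empty : PySem.Set Int) := by simp [PySem.Set.empty]
  constructor
  · rintro (h | ⟨q, hq1, hq2, hq3⟩)
    · exact absurd h hempty
    · rw [PySem.List.mem_pyRange_iff_of_pos (by omega)] at hq3
      obtain ⟨hq4, hq5, hq6⟩ := hq3
      have hdvd : q ∣ i := by
        have hqq : q ∣ q * q := dvd_mul_left q q
        simpa using dvd_add hq6 hqq
      exact not_prime_of_divisor hq1 (by nlinarith) hdvd
  · intro hnp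
    right
    have h1 : i.toNat ≠ 1 := by omega
    set q : Nat := i.toNat.minFac with hq
    have hqp : q.Prime := Nat.minFac_prime h1
    have hqd : q ∣ i.toNat := Nat.minFac_dvd _
    have hqsq : q * q ≤ i.toNat := by
      have h' := Nat.minFac_sq_le_self (by omega) hnp
      rwa [pow_two] at h'
    have hq2 : (2 : Int) ≤ (q : Int) := by exact_mod_cast hqp.two_le
    have hiq : ((i.toNat : Nat) : Int) = i := Int.toNat_of_nonneg (by omega)
    have hqsqI : (q : Int) * (q : Int) ≤ i := by
      rw [← hiq]; exact_mod_cast hqsq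
    have hdvd : (q : Int) ∣ i := by
      rw [int_dvd_iff_toNat (by positivity) (by omega)]
      simpa using hqd
    refine ⟨(q : Int), hq2, le_trans hqsqI hn, ?_⟩
    rw [PySem.List.mem_pyRange_iff_of_pos (by positivity)]
    exact ⟨hqsqI, by omega, dvd_sub hdvd (dvd_mul_left _ _)⟩

-- trial-division loop correctness
-- the invariant "no divisor below i" plus i*i > n forces primality
lemma prime_of_no_small_divisor {n i : Int} (h2 : 2 ≤ n) (hi : 0 < i) (hni : n < i * i)
    (hinv : ∀ d : Int, 2 ≤ d → d < i → ¬ d ∣ n) : Nat.Prime n.toNat := by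
  rw [Nat.prime_def_lt]
  refine ⟨by omega, ?_⟩
  intro m hm hmd
  by_contra hm1
  have hm0 : m ≠ 0 := by
    rintro rfl
    have := Nat.eq_zero_of_zero_dvd hmd
    omega
  have hm2 : 2 ≤ m := by omega
  have hdInt : (m : Int) ∣ n := by
    rw [int_dvd_iff_toNat (by positivity) (by omega)]
    simpa using hmd
  have hd2 : (2 : Int) ≤ (m : Int) := by exact_mod_cast hm2
  have hdn : (m : Int) < n := by omega
  by_cases hdi : (m : Int) < i
  · exact hinv _ hd2 hdi hdInt
  · push Not at hdi
    obtain ⟨e, he⟩ := hdInt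
    have hd0 : (0 : Int) < (m : Int) := by omega
    have he0 : (0 : Int) < e := by nlinarith
    have he1 : e ≠ 1 := by
      rintro rfl
      rw [mul_one] at he
      omega
    have hei : e < i := by nlinarith
    exact hinv e (by omega) hei ⟨(m : Int), by rw [he]; ring⟩

lemma isPrimeLoop_iff : ∀ (k : Nat) (n i : Int), (n + 1 - i).toNat ≤ k → 2 ≤ n → n % 2 ≠ 0 →
    3 ≤ i → i % 2 = 1 → (∀ d : Int, 2 ≤ d → d < i → ¬ d ∣ n) →
    (isPrimeLoop n k i = true ↔ Nat.Prime n.toNat) := by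
  intro k
  induction k with
  | zero =>
    intro n i hk h2 hodd hi3 hiodd hinv
    have hii : i ≤ i * i := by nlinarith
    have hni : ¬ i * i ≤ n := by omega
    rw [isPrimeLoop]
    simp only [true_iff]
    exact prime_of_no_small_divisor h2 (by omega) (by omega) hinv
  | succ k ih =>
    intro n i hk h2 hodd hi3 hiodd hinv
    rw [isPrimeLoop]
    by_cases hii : i * i ≤ n
    · rw [if_pos hii]
      have hin : i ≤ n := by nlinarith
      by_cases hdvd : i ∣ n
      · rw [if_pos ((PySem.Int.mod_eq_zero_iff_dvd n i).mpr hdvd)]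
        simp only [Bool.false_eq_true, false_iff]
        exact not_prime_of_divisor (by omega) (by nlinarith) hdvd
      · rw [if_neg (fun h => hdvd ((PySem.Int.mod_eq_zero_iff_dvd n i).mp h))]
        apply ih n (i + 2) (by omega) h2 hodd (by omega) (by omega)
        intro d hd2 hdlt hddvd
        rcases (by omega : d < i ∨ d = i ∨ d = i + 1) with h | h | h
        · exact hinv d hd2 h hddvd
        · subst h; exact hdvd hddvd
        · subst h
          have h2d : (2 : Int) ∣ i + 1 := by omega
          have h2n : (2 : Int) ∣ n := dvd_trans h2d hddvd
          omega
    · rw [if_neg hii]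
      simp only [true_iff]
      exact prime_of_no_small_divisor h2 (by omega) (by omega) hinv

lemma is_prime_iff (n : Int) (h : 2 ≤ n) : is_prime n = true ↔ Nat.Prime n.toNat := by
  unfold is_prime
  rcases eq_or_lt_of_le h with rfl | h3
  · norm_num
    decide
  · rw [if_neg (by omega), if_neg (by omega)]
    by_cases he : PySem.Int.mod n 2 = 0
    · rw [if_pos he]
      simp only [Bool.false_eq_true, false_iff]
      exact not_prime_of_divisor (le_refl _) (by omega)
        ((PySem.Int.mod_eq_zero_iff_dvd n 2).mp he)
    · rw [if_neg he]
      have hodd : n % 2 ≠ 0 := fun h' =>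
        he ((PySem.Int.mod_eq_zero_iff_dvd n 2).mpr (by omega))
      apply isPrimeLoop_iff (n.toNat + 1) n 3 (by omega) h hodd (le_refl _) (by decide)
      intro d hd2 hd3 hddvd
      have hd : d = 2 := by omega
      subst hd
      omega

lemma foldl_solveStep (l : List Int) : ∀ (s0 : Int) (o0 : Option Int),
    l.foldl solveStep (s0, o0) =
      (s0 + ((l.filter (fun i => is_prime i)).map (fun i => i ^ 5)).sum,
       match o0 with
       | some v => some v
       | none => (l.filter (fun i => is_prime i)).find? (fun i => PySem.Int.mod i 2 ≠ 0)) := by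
  induction l with
  | nil =>
    intro s0 o0
    cases o0 <;> simp
  | cons a l ih =>
    intro s0 o0
    rw [List.foldl_cons]
    by_cases hp : is_prime a = true
    · have step : solveStep (s0, o0) a =
          (s0 + a ^ 5, match o0 with
            | none => if PySem.Int.mod a 2 ≠ 0 then some a else none
            | some v => some v) := by
        simp [solveStep, hp]
      rw [step, List.filter_cons_of_pos (by simpa using hp)]
      cases o0 with
      | some v =>
        rw [ih]
        simp [add_assoc]
      | none =>
        by_cases ho : PySem.Int.mod a 2 ≠ 0
        · rw [if_pos ho, ih]
          simp only [List.map_cons, List.sum_cons]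
          refine Prod.ext (by push_cast; ring) ?_
          rw [List.find?_cons_of_pos (by simpa using ho)]
        · rw [if_neg ho, ih]
          simp only [List.map_cons, List.sum_cons]
          refine Prod.ext (by push_cast; ring) ?_
          rw [List.find?_cons_of_neg (by simpa using ho)]
    · have step : solveStep (s0, o0) a = (s0, o0) := by
        simp [solveStep, hp]
      rw [step, ih, List.filter_cons_of_neg (by simpa using hp)]

lemma filters_eq (n : Int) :
    (PySem.List.pyRange 2 (n + 1) 1).filter (fun i => is_prime i) =
    (PySem.List.pyRange 2 (n + 1) 1).filter (fun i => !((sieveLoop n (n.toNat + 1) 2 PySem.Set.empty).contains i)) := by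
  apply List.filter_congr
  intro i hi
  rw [PySem.List.mem_pyRange_one] at hi
  have h2 : 2 ≤ i := hi.1
  have hin : i ≤ n := by omega
  have hmem := mem_sieve_iff_not_prime n i h2 hin
  have hip := is_prime_iff i h2
  by_cases hp : Nat.Prime i.toNat
  · have hnm : i ∉ sieveLoop n (n.toNat + 1) 2 PySem.Set.empty := by
      rw [hmem]; simp [hp]
    simp [hip.mpr hp]
    simpa [PySem.Set.empty] using hnm
  · have hm : i ∈ sieveLoop n (n.toNat + 1) 2 PySem.Set.empty := hmem.mpr hp
    have h1 : is_prime i = false := by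
      cases hb : is_prime i
      · rfl
      · exact absurd (hip.mp hb) hp
    simp [h1]
    simpa [PySem.Set.empty] using hm

theorem solve_main (n : Int) : solve n = solve_alt n := by
  simp only [solve, solve_alt]
  rw [foldl_solveStep, ← filters_eq n]
  simp only [zero_add]

-- ===== VERDICT (by name: the statement is the Claim_ definition above) =====
theorem solve_spec : Claim_equal_solve := by
  intro n _
  unfold Spec_solve
  exact solve_main n
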